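-- pv_equiv track=rewrite | github.com/Jedytas/ip | ip4.py | _create_snowflake
-- ===== SOURCE A (Python) =====
-- def _create_snowflake(side_length):
--     """Создает начальную снежинку в виде квадратной матрицы."""
--     matrix = [['-' for _ in range(side_length)] for _ in range(side_length)]
--     mid = side_length // 2
--     for i in range(side_length):
--         for j in range(side_length):
--             if i == mid or j == mid or i == j or i + j == side_length - 1:
--                 matrix[i][j] = '*'
--     return matrix
-- ===== SOURCE B (Python) =====
-- def _create_snowflake(side_length):
--     """Snowflake matrix: instead of testing every cell with a nested scan,
--     mark the target cells directly in one linear pass."""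
--     matrix = [['-' for _ in range(side_length)] for _ in range(side_length)]
--     mid = side_length // 2
--     for k in range(side_length):
--         matrix[k][k] = '*'
--         matrix[k][side_length - 1 - k] = '*'
--         matrix[mid][k] = '*'
--         matrix[k][mid] = '*'
--     return matrix
-- ===== Notes on version B (the rewrite author's own statement) =====
-- stated objective: simpler
-- what changed: Replaces A's O(n^2) nested per-cell condition scan with a single O(n) loop that directly writes the four target cells (both diagonal cells, the middle-row cell and the middle-column cell) for each index.
import Mathlib
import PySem

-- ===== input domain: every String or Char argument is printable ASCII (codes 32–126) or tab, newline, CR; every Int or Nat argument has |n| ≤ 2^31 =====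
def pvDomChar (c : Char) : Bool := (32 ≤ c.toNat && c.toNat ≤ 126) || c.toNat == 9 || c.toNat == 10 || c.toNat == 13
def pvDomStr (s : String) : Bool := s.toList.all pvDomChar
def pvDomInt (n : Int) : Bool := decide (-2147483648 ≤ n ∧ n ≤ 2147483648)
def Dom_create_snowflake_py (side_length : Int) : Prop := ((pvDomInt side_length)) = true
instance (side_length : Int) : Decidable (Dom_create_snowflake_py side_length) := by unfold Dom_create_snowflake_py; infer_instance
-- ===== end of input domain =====

-- B replaces A's O(n²) per-cell nested condition scan with a single O(n) pass that
-- marks the four target cells of each index directly (simpler control flow, same cells).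

-- ===== PORT A =====
-- literal port of A's nested per-cell scan; loop indices i, j come from range(side_length),
-- hence are nonnegative, so .toNat is exact there
def create_snowflake_py (side_length : Int) : List (List String) :=
  let matrix := (PySem.List.pyRange 0 side_length 1).map (fun _ =>
      (PySem.List.pyRange 0 side_length 1).map (fun _ => "-"))
  let mid := PySem.Int.floordiv side_length 2
  (PySem.List.pyRange 0 side_length 1).foldl (fun m i =>
    (PySem.List.pyRange 0 side_length 1).foldl (fun m j =>
      if i = mid ∨ j = mid ∨ i = j ∨ i + j = side_length - 1 then
        m.modify i.toNat (fun row => row.set j.toNat "*")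
      else m) m) matrix

-- ===== PORT B =====
-- literal port of Source B: one linear pass, four direct writes per index
-- (k, mid, side_length-1-k are nonnegative whenever the loop body runs, so .toNat is exact)
def create_snowflake_py_alt (side_length : Int) : List (List String) :=
  let matrix := (PySem.List.pyRange 0 side_length 1).map (fun _ =>
      (PySem.List.pyRange 0 side_length 1).map (fun _ => "-"))
  let mid := PySem.Int.floordiv side_length 2
  (PySem.List.pyRange 0 side_length 1).foldl (fun m k =>
    let m1 := m.modify k.toNat (fun row => row.set k.toNat "*")
    let m2 := m1.modify k.toNat (fun row => row.set (side_length - 1 - k).toNat "*")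
    let m3 := m2.modify mid.toNat (fun row => row.set k.toNat "*")
    m3.modify k.toNat (fun row => row.set mid.toNat "*")) matrix

-- ===== PRECONDITION & SPEC =====
def Spec_create_snowflake_py (side_length : Int) (out : List (List String)) : Prop := out = create_snowflake_py_alt side_length
instance (side_length : Int) (out : List (List String)) : Decidable (Spec_create_snowflake_py side_length out) := by unfold Spec_create_snowflake_py; infer_instance

-- ===== CLAIM (what is proved, stated in full; the proofs are below) =====
def Claim_equal_create_snowflake_py : Prop := ∀ (side_length : Int), Dom_create_snowflake_py side_length → Spec_create_snowflake_py side_length (create_snowflake_py side_length)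

-- ===== LEMMAS AND PROOFS =====

-- write "*" at matrix position p (row p.1, column p.2); both ports' writes have this shape
def wStar (m : List (List String)) (p : Nat × Nat) : List (List String) :=
  m.modify p.1 (fun row => row.set p.2 "*")

-- the cell at (i, j), with "-"-free defaults irrelevant in-range
def cellAt (m : List (List String)) (i j : Nat) : String :=
  ((m[i]?.getD [])[j]?.getD "-")

theorem length_wStar (m : List (List String)) (p : Nat × Nat) :
    (wStar m p).length = m.length := by
  simp [wStar]

theorem rowlen_wStar (m : List (List String)) (p : Nat × Nat) (i : Nat) :
    ((wStar m p)[i]?.getD []).length = (m[i]?.getD []).length := by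
  simp only [wStar, List.getElem?_modify]
  cases m[i]? with
  | none => rfl
  | some row => by_cases h : p.1 = i <;> simp [h]

theorem cellAt_wStar (m : List (List String)) (p : Nat × Nat) (i j : Nat) :
    cellAt (wStar m p) i j =
      if p.1 = i ∧ p.2 = j ∧ i < m.length ∧ j < (m[i]?.getD []).length then "*"
      else cellAt m i j := by
  rcases p with ⟨a, b⟩
  simp only [cellAt, wStar, List.getElem?_modify]
  rcases hm : m[i]? with _ | row
  · have hi : ¬ i < m.length := by
      have := List.getElem?_eq_none_iff.mp hm
      omega
    simp [hi]
  · have hi : i < m.length := by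
      rcases Nat.lt_or_ge i m.length with h | h
      · exact h
      · rw [List.getElem?_eq_none_iff.mpr h] at hm
        cases hm
    by_cases h1 : a = i
    · subst h1
      simp only [Option.map_eq_map, Option.map_some, Option.getD_some, if_true]
      rw [List.getElem?_set]
      by_cases h2 : b = j
      · subst h2
        by_cases h3 : b < row.length
        · simp [h3, hi]
        · have hb : row[b]? = none := by
            rw [List.getElem?_eq_none_iff]
            omega
          simp [h3]
      · simp [h2]
    · simp [h1]

theorem cellAt_foldl_wStar (ps : List (Nat × Nat)) (m : List (List String)) (i j : Nat) :
    cellAt (ps.foldl wStar m) i j =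
      if (i, j) ∈ ps ∧ i < m.length ∧ j < (m[i]?.getD []).length then "*"
      else cellAt m i j := by
  induction ps generalizing m with
  | nil => simp
  | cons p ps ih =>
    rw [List.foldl_cons, ih, length_wStar, rowlen_wStar, cellAt_wStar]
    rcases p with ⟨a, b⟩
    by_cases hmem : (i, j) ∈ ps <;>
      by_cases ha : a = i <;> by_cases hb : b = j <;>
        simp_all [Prod.ext_iff] <;> tauto

theorem length_foldl_wStar (ps : List (Nat × Nat)) (m : List (List String)) :
    (ps.foldl wStar m).length = m.length := by
  induction ps generalizing m with
  | nil => rfl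
  | cons p ps ih => rw [List.foldl_cons, ih, length_wStar]

theorem rowlen_foldl_wStar (ps : List (Nat × Nat)) (m : List (List String)) (i : Nat) :
    ((ps.foldl wStar m)[i]?.getD []).length = (m[i]?.getD []).length := by
  induction ps generalizing m with
  | nil => rfl
  | cons p ps ih => rw [List.foldl_cons, ih, rowlen_wStar]

theorem getElem_eq_cellAt (m : List (List String)) (i j : Nat)
    (hi : i < m.length) (hj : j < m[i].length) :
    m[i][j] = cellAt m i j := by
  simp [cellAt, hi, hj]

-- the star-writes commute up to the SET of written cells: only membership matters
theorem foldl_wStar_eq (ps qs : List (Nat × Nat)) (m : List (List String))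
    (h : ∀ a b, (a, b) ∈ ps ↔ (a, b) ∈ qs) :
    ps.foldl wStar m = qs.foldl wStar m := by
  have hlen : (ps.foldl wStar m).length = (qs.foldl wStar m).length := by
    rw [length_foldl_wStar, length_foldl_wStar]
  apply List.ext_getElem hlen
  intro i hi1 hi2
  have him : i < m.length := by rwa [length_foldl_wStar] at hi1
  have hrow : (ps.foldl wStar m)[i].length = (qs.foldl wStar m)[i].length := by
    have e1 : (ps.foldl wStar m)[i]?.getD [] = (ps.foldl wStar m)[i] := by
      rw [List.getElem?_eq_getElem hi1]
      rfl
    have e2 : (qs.foldl wStar m)[i]?.getD [] = (qs.foldl wStar m)[i] := by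
      rw [List.getElem?_eq_getElem hi2]
      rfl
    rw [← e1, ← e2, rowlen_foldl_wStar, rowlen_foldl_wStar]
  apply List.ext_getElem hrow
  intro j hj1 hj2
  rw [getElem_eq_cellAt _ _ _ hi1 hj1, getElem_eq_cellAt _ _ _ hi2 hj2,
    cellAt_foldl_wStar, cellAt_foldl_wStar]
  exact if_congr (and_congr_left' (h i j)) rfl rfl

-- a fold of conditional writes is the fold of wStar over the filtered, mapped index list
theorem foldl_if_filter {α : Type} (C : α → Prop) [DecidablePred C] (f : α → Nat × Nat)
    (xs : List α) (m : List (List String)) :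
    xs.foldl (fun m x => if C x then wStar m (f x) else m) m
      = ((xs.filter (fun x => decide (C x))).map f).foldl wStar m := by
  induction xs generalizing m with
  | nil => rfl
  | cons x xs ih =>
    by_cases h : C x <;> simp [h, ih]

-- a fold of per-element folds is one fold over the flattened list
theorem foldl_flatMap {α β γ : Type} (g : α → List β) (F : γ → β → γ)
    (xs : List α) (init : γ) :
    xs.foldl (fun acc x => (g x).foldl F acc) init = (xs.flatMap g).foldl F init := by
  induction xs generalizing init with
  | nil => rfl
  | cons x xs ih => simp [List.flatMap_cons, List.foldl_append, ih]

theorem create_snowflake_eq (n : Int) :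
    create_snowflake_py n = create_snowflake_py_alt n := by
  by_cases hn : n ≤ 0
  · simp [create_snowflake_py, create_snowflake_py_alt,
      PySem.List.pyRange_one_eq_nil (by omega : n ≤ 0)]
  · -- 0 < n : write n = ↑N and reduce both sides to folds of wStar over pair lists
    have hn' : 0 < n := by omega
    obtain ⟨N, rfl⟩ : ∃ N : Nat, n = (N : Int) := ⟨n.toNat, (Int.toNat_of_nonneg (by omega)).symm⟩
    have hN : 0 < N := by exact_mod_cast hn'
    have hmid : PySem.Int.floordiv (N : Int) 2 = (N : Int) / 2 :=
      PySem.Int.floordiv_eq_ediv_of_pos (by omega)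
    simp only [create_snowflake_py, create_snowflake_py_alt,
      PySem.List.pyRange_zero_natCast, List.foldl_map, Int.toNat_natCast, hmid]
    set M : Nat := ((N : Int) / 2).toNat with hM
    have hMcast : ((N : Int) / 2) = (M : Int) := by omega
    set matrix : List (List String) :=
      (List.map (fun k : Nat => (k : Int)) (List.range N)).map (fun _ =>
        (List.map (fun k : Nat => (k : Int)) (List.range N)).map (fun _ => ("-" : String)))
    -- A side as a fold of wStar over a pair list
    have hA : (List.range N).foldl (fun (m : List (List String)) (i : Nat) =>
        (List.range N).foldl (fun (m : List (List String)) (j : Nat) =>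
          if (i : Int) = (N : Int) / 2 ∨ (j : Int) = (N : Int) / 2 ∨ (i : Int) = (j : Int) ∨
              (i : Int) + (j : Int) = (N : Int) - 1 then
            wStar m (i, j)
          else m) m) matrix
        = ((List.range N).flatMap (fun (i : Nat) =>
            ((List.range N).filter (fun (j : Nat) => decide ((i : Int) = (N : Int) / 2 ∨ (j : Int) = (N : Int) / 2 ∨
              (i : Int) = (j : Int) ∨ (i : Int) + (j : Int) = (N : Int) - 1))).map (fun (j : Nat) => (i, j)))).foldl
            wStar matrix := by
      rw [← foldl_flatMap]
      have hF : (fun (m : List (List String)) (i : Nat) =>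
          (List.range N).foldl (fun (m : List (List String)) (j : Nat) =>
            if (i : Int) = (N : Int) / 2 ∨ (j : Int) = (N : Int) / 2 ∨ (i : Int) = (j : Int) ∨
                (i : Int) + (j : Int) = (N : Int) - 1 then
              wStar m (i, j)
            else m) m)
          = (fun (m : List (List String)) (i : Nat) =>
            (((List.range N).filter (fun (j : Nat) => decide ((i : Int) = (N : Int) / 2 ∨ (j : Int) = (N : Int) / 2 ∨
              (i : Int) = (j : Int) ∨ (i : Int) + (j : Int) = (N : Int) - 1))).map (fun (j : Nat) => (i, j))).foldl wStar m) := by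
        funext m i
        exact foldl_if_filter _ _ _ _
      rw [hF]
    -- B side as a fold of wStar over a pair list
    have hB : (List.range N).foldl (fun (m : List (List String)) (k : Nat) =>
        wStar (wStar (wStar (wStar m (k, k)) (k, ((N : Int) - 1 - (k : Int)).toNat)) (M, k)) (k, M)) matrix
        = ((List.range N).flatMap (fun (k : Nat) =>
            [(k, k), (k, ((N : Int) - 1 - (k : Int)).toNat), (M, k), (k, M)])).foldl wStar matrix := by
      rw [← foldl_flatMap]
      rfl
    simp only [wStar, hMcast] at hA hB ⊢
    rw [hA, hB]
    apply foldl_wStar_eq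
    intro a b
    simp only [List.mem_flatMap, List.mem_map, List.mem_filter, List.mem_range,
      List.mem_cons, List.not_mem_nil, or_false, decide_eq_true_eq, Prod.mk.injEq]
    have hMlt : M < N := by omega
    constructor
    · intro h
      obtain ⟨i, hi, j, ⟨hj, hc⟩, rfl, rfl⟩ := h
      rcases hc with hc | hc | hc | hc
      · exact ⟨j, hj, by omega⟩
      · exact ⟨i, hi, by omega⟩
      · exact ⟨i, hi, by omega⟩
      · exact ⟨i, hi, by omega⟩
    · intro h
      obtain ⟨k, hk, hcase⟩ := h
      exact ⟨a, by omega, b, ⟨by omega, by omega⟩, rfl, rfl⟩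

-- ===== VERDICT (by name: the statement is the Claim_ definition above) =====
theorem create_snowflake_py_spec : Claim_equal_create_snowflake_py := by
  intro n _
  unfold Spec_create_snowflake_py
  exact create_snowflake_eq n
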